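-- pv_equiv track=rewrite | github.com/JK42JJ/warfront | warfront/core/algorithms.py | knapsack_sim
-- ===== SOURCE A (Python) =====
-- from typing import Any, Dict, List, Optional, Tuple
--
-- def knapsack_sim(
--     items: List[Tuple[str, int, int]],
--     capacity: int,
-- ) -> List[Tuple[Any, str, str]]:
--     """0-1 Knapsack DP simulation.
--
--     Args:
--         items:    List of (name, weight, value) tuples.
--         capacity: Maximum knapsack capacity.
--
--     Returns steps as (dp_table, description, extra_info).
--     """
--     n = len(items)
--     dp: List[List[int]] = [[0] * (capacity + 1) for _ in range(n + 1)]
--     steps: List[Tuple[Any, str, str]] = []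
--
--     for i in range(1, n + 1):
--         name, w, v = items[i - 1]
--         for j in range(capacity + 1):
--             if w <= j:
--                 dp[i][j] = max(dp[i - 1][j], dp[i - 1][j - w] + v)
--             else:
--                 dp[i][j] = dp[i - 1][j]
--
--         steps.append((
--             [row[:] for row in dp],  # shallow copy of rows
--             f"Processing Item '{name}' (Weight:{w}, Value:{v})",
--             f"Current Max Value: {dp[i][capacity]}",
--         ))
--
--     # Backtracking to find selected items
--     selected: List[str] = []
--     curr_w = capacity
--     for i in range(n, 0, -1):
--         if dp[i][curr_w] != dp[i - 1][curr_w]: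
--             name, w, v = items[i - 1]
--             selected.append(name)
--             curr_w -= w
--
--     steps.append((
--         [row[:] for row in dp],
--         f"Optimal Loading: {selected}",
--         f"Total Value: {dp[n][capacity]} | Capacity: {capacity}",
--     ))
--     return steps
-- ===== SOURCE B (Python) =====
-- from typing import Any, List, Tuple
--
-- def knapsack_sim(
--     items: List[Tuple[str, int, int]],
--     capacity: int,
-- ) -> List[Tuple[Any, str, str]]:
--     """Reachable-states (Bellman pair-list) knapsack: instead of the per-cell
--     table recurrence, maintain for each prefix of items a dict mapping each
--     achievable total weight (<= capacity) to the best achievable value; every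
--     DP row is then the running prefix-maximum over that sparse dict, and the
--     snapshot tables/backtrack are assembled from those rows."""
--     n = len(items)
--     layer = {0: 0}
--     layers = [layer]
--     for name, w, v in items:
--         new = {}
--         for pw, pv in layer.items():
--             for dw, dv in ((0, 0), (w, v)):
--                 x = pw + dw
--                 val = pv + dv
--                 if x <= capacity and (x not in new or new[x] < val):
--                     new[x] = val
--         layer = new
--         layers.append(layer)
--
--     def row(d):
--         arr = [None] * (capacity + 1)
--         for pw, pv in d.items():
--             if 0 <= pw <= capacity and (arr[pw] is None or arr[pw] < pv):
--                 arr[pw] = pv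
--         r = []
--         best = None
--         for j in range(capacity + 1):
--             if arr[j] is not None and (best is None or arr[j] > best):
--                 best = arr[j]
--             r.append(best)
--         return r
--
--     rows = [row(d) for d in layers]
--     zero = [0] * (capacity + 1)
--
--     steps: List[Tuple[Any, str, str]] = []
--     for i in range(1, n + 1):
--         name, w, v = items[i - 1]
--         table = [r[:] for r in rows[:i + 1]] + [zero[:] for _ in range(n - i)]
--         steps.append((table,
--                       f"Processing Item '{name}' (Weight:{w}, Value:{v})",
--                       f"Current Max Value: {rows[i][capacity]}"))
--
--     selected: List[str] = []
--     curr_w = capacity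
--     for i in range(n, 0, -1):
--         if rows[i][curr_w] != rows[i - 1][curr_w]:
--             name, w, v = items[i - 1]
--             selected.append(name)
--             curr_w -= w
--
--     steps.append(([r[:] for r in rows],
--                   f"Optimal Loading: {selected}",
--                   f"Total Value: {rows[n][capacity]} | Capacity: {capacity}"))
--     return steps
-- ===== Notes on version B (the rewrite author's own statement) =====
-- stated objective: alternative
-- what changed: Replaces the per-cell 0/1-knapsack table recurrence by the reachable-states (sparse pair-list) algorithm: a dict mapping each achievable total weight (<= capacity) to its best value is maintained per item, each DP row is then read off as a running prefix maximum over that dict, and the snapshots/backtrack are assembled from those rows.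
-- outside the precondition, e.g. on knapsack_sim([('a', 1, 2)], -1): A raises IndexError, B raises IndexError
import Mathlib
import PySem

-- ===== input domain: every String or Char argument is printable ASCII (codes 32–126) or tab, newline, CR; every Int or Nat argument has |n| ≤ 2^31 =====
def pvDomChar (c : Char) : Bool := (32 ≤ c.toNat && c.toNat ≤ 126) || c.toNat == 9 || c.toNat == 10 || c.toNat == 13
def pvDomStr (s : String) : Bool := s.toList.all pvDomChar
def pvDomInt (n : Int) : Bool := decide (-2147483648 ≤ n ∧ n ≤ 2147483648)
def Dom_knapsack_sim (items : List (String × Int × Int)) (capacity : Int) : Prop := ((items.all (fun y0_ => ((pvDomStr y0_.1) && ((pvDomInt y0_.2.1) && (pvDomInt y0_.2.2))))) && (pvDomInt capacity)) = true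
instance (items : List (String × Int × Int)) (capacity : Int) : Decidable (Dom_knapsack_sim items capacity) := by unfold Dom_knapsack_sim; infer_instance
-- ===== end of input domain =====

-- B replaces the per-cell table recurrence by the reachable-states (sparse pair-list) knapsack:
-- a dict of achievable weight → best value per item prefix, each DP row read off as a prefix maximum;
-- same asymptotic cost ('alternative'), equivalence of RETURN values proved.

-- ===== PORT A =====
-- shared f-string helpers (both Pythons build the identical strings)
-- Python repr of an ASCII string (quote choice and escapes), needed for f"{selected}"
def pyStrReprChars (s : List Char) : List Char :=
  let q : Char := if s.contains '\'' && !(s.contains '"') then '"' else '\''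
  [q] ++ s.flatMap (fun c =>
    if c = '\\' then ['\\', '\\']
    else if c = q then ['\\', q]
    else if c = '\t' then ['\\', 't']
    else if c = '\n' then ['\\', 'n']
    else if c = '\r' then ['\\', 'r']
    else [c]) ++ [q]

def pyListReprStr (xs : List String) : String :=
  "[" ++ PySem.Str.join ", " (xs.map (fun s => String.ofList (pyStrReprChars s.toList))) ++ "]"

def msgItem (name : String) (w v : Int) : String :=
  "Processing Item '" ++ name ++ "' (Weight:" ++ PySem.Int.toStr w ++ ", Value:" ++ PySem.Int.toStr v ++ ")"
def msgCur (x : Int) : String := "Current Max Value: " ++ PySem.Int.toStr x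
def msgOpt (sel : List String) : String := "Optimal Loading: " ++ pyListReprStr sel
def msgTot (x cap : Int) : String :=
  "Total Value: " ++ PySem.Int.toStr x ++ " | Capacity: " ++ PySem.Int.toStr cap

-- [0] * (capacity + 1)
def zrow (c : Int) : List Int := List.replicate (c + 1).toNat 0

-- port of A: preallocated (n+1)-row table, mutated in place, snapshot appended inside the DP loop
def knapsack_sim (items : List (String × Int × Int)) (capacity : Int) :
    List (List (List Int) × String × String) :=
  let n : Int := PySem.List.len items
  let dp0 : List (List Int) := (PySem.List.pyRange 0 (n + 1) 1).map (fun _ => zrow capacity)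
  let res := (PySem.List.pyRange 1 (n + 1) 1).foldl
    (fun (st : List (List Int) × List (List (List Int) × String × String)) i =>
      let item := (PySem.List.pyGet? items (i - 1)).getD ("", 0, 0)
      let dp := (PySem.List.pyRange 0 (capacity + 1) 1).foldl
        (fun dp j =>
          PySem.List.pySetD dp i (PySem.List.pySetD (PySem.List.pyGetD dp i []) j
            (if item.2.1 ≤ j then
              max (PySem.List.pyGetD (PySem.List.pyGetD dp (i - 1) []) j 0)
                  (PySem.List.pyGetD (PySem.List.pyGetD dp (i - 1) []) (j - item.2.1) 0 + item.2.2)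
            else PySem.List.pyGetD (PySem.List.pyGetD dp (i - 1) []) j 0))) st.1
      (dp, st.2 ++ [(dp.map (fun row => row),
                     msgItem item.1 item.2.1 item.2.2,
                     msgCur (PySem.List.pyGetD (PySem.List.pyGetD dp i []) capacity 0))]))
    (dp0, [])
  let bt := (PySem.List.pyRange n 0 (-1)).foldl
    (fun (st : List String × Int) i =>
      if PySem.List.pyGetD (PySem.List.pyGetD res.1 i []) st.2 0 ≠
         PySem.List.pyGetD (PySem.List.pyGetD res.1 (i - 1) []) st.2 0 then
        let item := (PySem.List.pyGet? items (i - 1)).getD ("", 0, 0)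
        (st.1 ++ [item.1], st.2 - item.2.1)
      else st) ([], capacity)
  res.2 ++ [(res.1.map (fun row => row), msgOpt bt.1,
             msgTot (PySem.List.pyGetD (PySem.List.pyGetD res.1 n []) capacity 0) capacity)]

-- ===== PORT B =====
-- one item step of the reachable-states dict: for every achievable (weight, value) pair,
-- both "skip" and "take" candidates, keep the better value per weight, prune weight > capacity
def stepDict (cap w v : Int) (d : PySem.Dict Int Int) : PySem.Dict Int Int :=
  d.items.foldl (fun new p =>
    [((0 : Int), (0 : Int)), (w, v)].foldl (fun new q =>
      let x := p.1 + q.1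
      let val := p.2 + q.2
      if x ≤ cap then
        match new.get? x with
        | none => new.insert x val
        | some cur => if cur < val then new.insert x val else new
      else new) new) PySem.Dict.empty

-- row(d): scatter the dict into an array indexed by weight (first Python loop) …
def rowScatter (cap : Int) (d : PySem.Dict Int Int) : List (Option Int) :=
  d.items.foldl (fun (arr : List (Option Int)) (p : Int × Int) =>
    if 0 ≤ p.1 ∧ p.1 ≤ cap then
      match PySem.List.pyGetD arr p.1 none with
      | none => PySem.List.pySetD arr p.1 (some p.2)
      | some cur => if cur < p.2 then PySem.List.pySetD arr p.1 (some p.2) else arr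
    else arr) (List.replicate (cap + 1).toNat (none : Option Int))

-- … then running prefix maximum (second Python loop); best is an Option like Python's
-- None and '.getD 0' only coerces the type — inside Pre_ it is always some
def rowFn (cap : Int) (d : PySem.Dict Int Int) : List Int :=
  let arr := rowScatter cap d
  ((PySem.List.pyRange 0 (cap + 1) 1).foldl
    (fun (st : List Int × Option Int) j =>
      let best : Option Int :=
        match PySem.List.pyGetD arr j none, st.2 with
        | some a, none => some a
        | some a, some b => if a > b then some a else some b
        | none, b => b
      (st.1 ++ [best.getD 0], best)) ([], none)).1

-- port of B: layers of achievable-weight dicts, rows read off per layer, then the same recording/backtrack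
def knapsack_sim_alt (items : List (String × Int × Int)) (capacity : Int) :
    List (List (List Int) × String × String) :=
  let n : Int := PySem.List.len items
  let layers := (items.foldl
    (fun (st : PySem.Dict Int Int × List (PySem.Dict Int Int)) it =>
      let new := stepDict capacity it.2.1 it.2.2 st.1
      (new, st.2 ++ [new]))
    (PySem.Dict.ofList [(0, 0)], [PySem.Dict.ofList [(0, 0)]])).2
  let rows := layers.map (rowFn capacity)
  let steps := (PySem.List.pyRange 1 (n + 1) 1).foldl
    (fun steps i =>
      let table := (PySem.List.slice rows none (some (i + 1))).map (fun r => r) ++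
                   (PySem.List.pyRange 0 (n - i) 1).map (fun _ => zrow capacity)
      let item := (PySem.List.pyGet? items (i - 1)).getD ("", 0, 0)
      steps ++ [(table, msgItem item.1 item.2.1 item.2.2,
                 msgCur (PySem.List.pyGetD (PySem.List.pyGetD rows i []) capacity 0))]) []
  let bt := (PySem.List.pyRange n 0 (-1)).foldl
    (fun (st : List String × Int) i =>
      if PySem.List.pyGetD (PySem.List.pyGetD rows i []) st.2 0 ≠
         PySem.List.pyGetD (PySem.List.pyGetD rows (i - 1) []) st.2 0 then
        let item := (PySem.List.pyGet? items (i - 1)).getD ("", 0, 0)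
        (st.1 ++ [item.1], st.2 - item.2.1)
      else st) ([], capacity)
  steps ++ [(rows.map (fun row => row), msgOpt bt.1,
             msgTot (PySem.List.pyGetD (PySem.List.pyGetD rows n []) capacity 0) capacity)]

-- ===== PRECONDITION & SPEC =====
-- Pre_ excludes exactly the inputs where A raises IndexError: a negative capacity
-- (rows shorter than needed for dp[i][capacity]) or a negative item weight (dp[i-1][j-w] past the end).
def Pre_knapsack_sim (items : List (String × Int × Int)) (capacity : Int) : Prop :=
  0 ≤ capacity ∧ ∀ it ∈ items, 0 ≤ it.2.1
instance (items : List (String × Int × Int)) (capacity : Int) : Decidable (Pre_knapsack_sim items capacity) := by unfold Pre_knapsack_sim; infer_instance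

def pvWitness_knapsack_sim : (List (String × Int × Int)) × Int := ([("a", 1, 2), ("b", 2, 3)], 3)

def Spec_knapsack_sim (items : List (String × Int × Int)) (capacity : Int) (out : List (List (List Int) × String × String)) : Prop := out = knapsack_sim_alt items capacity
instance (items : List (String × Int × Int)) (capacity : Int) (out : List (List (List Int) × String × String)) : Decidable (Spec_knapsack_sim items capacity out) := by unfold Spec_knapsack_sim; infer_instance

-- ===== CLAIM (what is proved, stated in full; the proofs are below) =====
def Claim_equal_knapsack_sim : Prop := ∀ (items : List (String × Int × Int)) (capacity : Int), Dom_knapsack_sim items capacity → Pre_knapsack_sim items capacity → Spec_knapsack_sim items capacity (knapsack_sim items capacity)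


-- ===== LEMMAS AND PROOFS =====

-- ---- the nextRow chain (the mathematical row recurrence both programs realize) ----
def nextRow (c w v : Int) (prev : List Int) : List Int :=
  (PySem.List.pyRange 0 (c + 1) 1).map (fun j =>
    if w ≤ j then max (PySem.List.pyGetD prev j 0) (PySem.List.pyGetD prev (j - w) 0 + v)
    else PySem.List.pyGetD prev j 0)

def rowsF (c : Int) (rows : List (List Int)) (it : String × Int × Int) : List (List Int) :=
  rows ++ [nextRow c it.2.1 it.2.2 (PySem.List.pyGetD rows (-1) [])]

def rowsPre (c : Int) (its : List (String × Int × Int)) : List (List Int) :=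
  its.foldl (rowsF c) [zrow c]

lemma rowsF_foldl_length (c : Int) (l : List (String × Int × Int)) :
    ∀ acc : List (List Int), (l.foldl (rowsF c) acc).length = acc.length + l.length := by
  induction l with
  | nil => simp
  | cons x l ih => intro acc; simp [List.foldl_cons, ih, rowsF]; omega

lemma rowsPre_length (c : Int) (its : List (String × Int × Int)) :
    (rowsPre c its).length = its.length + 1 := by
  simp [rowsPre, rowsF_foldl_length]; omega

lemma rowsF_foldl_prefix (c : Int) (l : List (String × Int × Int)) :
    ∀ acc : List (List Int), acc <+: l.foldl (rowsF c) acc := by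
  induction l with
  | nil => intro acc; simp
  | cons x l ih =>
      intro acc
      exact List.IsPrefix.trans (by simp [rowsF]) (ih (rowsF c acc x))

lemma rowsPre_take (c : Int) (its : List (String × Int × Int)) (m : Nat) (hm : m ≤ its.length) :
    (rowsPre c its).take (m + 1) = rowsPre c (its.take m) := by
  have h1 : rowsPre c its = (its.drop m).foldl (rowsF c) (rowsPre c (its.take m)) := by
    rw [rowsPre, rowsPre, ← List.foldl_append, List.take_append_drop]
  obtain ⟨t, ht⟩ := rowsF_foldl_prefix c (its.drop m) (rowsPre c (its.take m))
  have hlen : (rowsPre c (its.take m)).length = m + 1 := by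
    rw [rowsPre_length]; simp [Nat.min_eq_left hm]
  rw [h1, ← ht, ← hlen, List.take_left]

lemma rowsPre_snoc (c : Int) (l : List (String × Int × Int)) (x : String × Int × Int) :
    rowsPre c (l ++ [x]) = rowsPre c l ++
      [nextRow c x.2.1 x.2.2 (PySem.List.pyGetD (rowsPre c l) (-1) [])] := by
  rw [rowsPre, rowsPre, List.foldl_append]; rfl

-- ---- A-side: the in-place table fold computes the nextRow chain (as in the table DP) ----
lemma set_append_of_len {α : Type} (A B : List α) (n : Nat) (h : A.length = n) (v : α) :
    (A ++ B).set n v = A ++ B.set 0 v := by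
  subst h; rw [List.set_append_right _ _ (le_refl _)]; simp

lemma setFold (g : Int → Int) : ∀ (k : Nat) (r : List Int), k ≤ r.length →
    (PySem.List.pyRange 0 (k : Int) 1).foldl (fun r j => PySem.List.pySetD r j (g j)) r
      = ((PySem.List.pyRange 0 (k : Int) 1).map g) ++ r.drop k := by
  intro k
  induction k with
  | zero => intro r _; simp [PySem.List.pyRange_one_eq_nil]
  | succ k ih =>
      intro r hk
      have hk' : k ≤ r.length := Nat.le_of_succ_le hk
      have hkk : k < r.length := hk
      have hcast : ((k + 1 : Nat) : Int) = (k : Int) + 1 := by push_cast; ring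
      rw [hcast, PySem.List.pyRange_one_succ_right (by positivity), List.foldl_append,
          List.map_append, ih r hk']
      have hlen : (((PySem.List.pyRange 0 (k : Int) 1).map g)).length = k := by
        simp [PySem.List.length_pyRange_one]
      simp only [List.foldl_cons, List.foldl_nil, List.map_cons, List.map_nil]
      rw [PySem.List.pySetD_natCast, set_append_of_len _ _ _ hlen]
      rw [List.drop_eq_getElem_cons hkk]
      simp
      rw [List.drop_eq_getElem_cons hkk, List.set_cons_zero]

lemma setFold_full (c : Int) (g : Int → Int) (r : List Int) (hr : r.length = (c + 1).toNat) :
    (PySem.List.pyRange 0 (c + 1) 1).foldl (fun r j => PySem.List.pySetD r j (g j)) r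
      = (PySem.List.pyRange 0 (c + 1) 1).map g := by
  by_cases h : 0 ≤ c + 1
  · have hc : ((c + 1).toNat : Int) = c + 1 := Int.toNat_of_nonneg h
    rw [← hc, setFold g (c + 1).toNat r (le_of_eq hr.symm)]
    simp [← hr]
  · have h0 : (c + 1).toNat = 0 := by omega
    have hr0 : r = [] := List.eq_nil_of_length_eq_zero (by omega)
    rw [PySem.List.pyRange_one_eq_nil (by omega)]
    simp [hr0]

lemma innerFold (i w v : Int) (hi1 : 1 ≤ i) :
    ∀ (js : List Int) (dp : List (List Int)) (P : List Int),
      (∀ j ∈ js, 0 ≤ j) → (i.toNat < dp.length) → PySem.List.pyGetD dp (i - 1) [] = P →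
      js.foldl (fun dp j => PySem.List.pySetD dp i (PySem.List.pySetD (PySem.List.pyGetD dp i []) j
        (if w ≤ j then max (PySem.List.pyGetD (PySem.List.pyGetD dp (i - 1) []) j 0)
           (PySem.List.pyGetD (PySem.List.pyGetD dp (i - 1) []) (j - w) 0 + v)
         else PySem.List.pyGetD (PySem.List.pyGetD dp (i - 1) []) j 0))) dp
      = PySem.List.pySetD dp i (js.foldl (fun r j => PySem.List.pySetD r j
          (if w ≤ j then max (PySem.List.pyGetD P j 0) (PySem.List.pyGetD P (j - w) 0 + v)
           else PySem.List.pyGetD P j 0)) (PySem.List.pyGetD dp i [])) := by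
  intro js
  induction js with
  | nil =>
      intro dp P _ hlen hP
      simp only [List.foldl_nil]
      rw [PySem.List.pySetD_of_nonneg _ _ (by omega),
          PySem.List.pyGetD_eq_getElem _ _ (by omega) (by omega), List.set_getElem_self]
  | cons j js ih =>
      intro dp P hjs hlen hP
      have h0j : (0:Int) ≤ j := hjs j (by simp)
      have hjs' : ∀ j ∈ js, (0:Int) ≤ j := fun x hx => hjs x (by simp [hx])
      simp only [List.foldl_cons]
      set r' := PySem.List.pySetD (PySem.List.pyGetD dp i []) j
          (if w ≤ j then max (PySem.List.pyGetD P j 0) (PySem.List.pyGetD P (j - w) 0 + v)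
           else PySem.List.pyGetD P j 0) with hr'
      have hbody : PySem.List.pySetD dp i (PySem.List.pySetD (PySem.List.pyGetD dp i []) j
        (if w ≤ j then max (PySem.List.pyGetD (PySem.List.pyGetD dp (i - 1) []) j 0)
           (PySem.List.pyGetD (PySem.List.pyGetD dp (i - 1) []) (j - w) 0 + v)
         else PySem.List.pyGetD (PySem.List.pyGetD dp (i - 1) []) j 0)) = PySem.List.pySetD dp i r' := by
        rw [hP]
      rw [hbody]
      have hlen' : i.toNat < (PySem.List.pySetD dp i r').length := by
        rw [PySem.List.pySetD_of_nonneg _ _ (by omega)]; simpa using hlen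
      have hP' : PySem.List.pyGetD (PySem.List.pySetD dp i r') (i - 1) [] = P := by
        rw [PySem.List.pySetD_of_nonneg _ _ (by omega),
            PySem.List.pyGetD_eq_getElem _ _ (by omega) (by simp; omega),
            List.getElem_set_ne (by omega), ← hP,
            PySem.List.pyGetD_eq_getElem _ _ (by omega) (by simp; omega)]
      rw [ih (PySem.List.pySetD dp i r') P hjs' hlen' hP']
      have hget : PySem.List.pyGetD (PySem.List.pySetD dp i r') i [] = r' := by
        rw [PySem.List.pySetD_of_nonneg _ _ (by omega),
            PySem.List.pyGetD_eq_getElem _ _ (by omega) (by simp; omega), List.getElem_set_self]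
      have hset : ∀ X, PySem.List.pySetD (PySem.List.pySetD dp i r') i X = PySem.List.pySetD dp i X := by
        intro X
        rw [PySem.List.pySetD_of_nonneg _ _ (by omega), PySem.List.pySetD_of_nonneg _ _ (by omega),
            PySem.List.pySetD_of_nonneg _ _ (by omega), List.set_set]
      rw [hget, hset]

def stepOf (items : List (String × Int × Int)) (c : Int) (i : Int) :
    List (List Int) × String × String :=
  let item := (PySem.List.pyGet? items (i - 1)).getD ("", 0, 0)
  (rowsPre c (items.take i.toNat) ++ List.replicate (items.length - i.toNat) (zrow c),
   msgItem item.1 item.2.1 item.2.2,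
   msgCur (PySem.List.pyGetD (PySem.List.pyGetD (rowsPre c items) i []) c 0))

def aBody (items : List (String × Int × Int)) (c : Int)
    (st : List (List Int) × List (List (List Int) × String × String)) (i : Int) :
    List (List Int) × List (List (List Int) × String × String) :=
  let item := (PySem.List.pyGet? items (i - 1)).getD ("", 0, 0)
  let dp := (PySem.List.pyRange 0 (c + 1) 1).foldl
    (fun dp j =>
      PySem.List.pySetD dp i (PySem.List.pySetD (PySem.List.pyGetD dp i []) j
        (if item.2.1 ≤ j then
          max (PySem.List.pyGetD (PySem.List.pyGetD dp (i - 1) []) j 0)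
              (PySem.List.pyGetD (PySem.List.pyGetD dp (i - 1) []) (j - item.2.1) 0 + item.2.2)
        else PySem.List.pyGetD (PySem.List.pyGetD dp (i - 1) []) j 0))) st.1
  (dp, st.2 ++ [(dp.map (fun row => row),
                 msgItem item.1 item.2.1 item.2.2,
                 msgCur (PySem.List.pyGetD (PySem.List.pyGetD dp i []) c 0))])

def aTail (items : List (String × Int × Int)) (c : Int)
    (res : List (List Int) × List (List (List Int) × String × String)) :
    List (List (List Int) × String × String) :=
  let n : Int := PySem.List.len items
  let bt := (PySem.List.pyRange n 0 (-1)).foldl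
    (fun (st : List String × Int) i =>
      if PySem.List.pyGetD (PySem.List.pyGetD res.1 i []) st.2 0 ≠
         PySem.List.pyGetD (PySem.List.pyGetD res.1 (i - 1) []) st.2 0 then
        let item := (PySem.List.pyGet? items (i - 1)).getD ("", 0, 0)
        (st.1 ++ [item.1], st.2 - item.2.1)
      else st) ([], c)
  res.2 ++ [(res.1.map (fun row => row), msgOpt bt.1,
             msgTot (PySem.List.pyGetD (PySem.List.pyGetD res.1 n []) c 0) c)]

lemma knapsack_sim_eq (items : List (String × Int × Int)) (c : Int) :
    knapsack_sim items c = aTail items c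
      ((PySem.List.pyRange 1 (PySem.List.len items + 1) 1).foldl (aBody items c)
        ((PySem.List.pyRange 0 (PySem.List.len items + 1) 1).map (fun _ => zrow c), [])) := rfl

def bStepF (items : List (String × Int × Int)) (c : Int) (rows : List (List Int)) (i : Int) :
    List (List Int) × String × String :=
  let table := (PySem.List.slice rows none (some (i + 1))).map (fun r => r) ++
               (PySem.List.pyRange 0 (PySem.List.len items - i) 1).map (fun _ => zrow c)
  let item := (PySem.List.pyGet? items (i - 1)).getD ("", 0, 0)
  (table, msgItem item.1 item.2.1 item.2.2,
   msgCur (PySem.List.pyGetD (PySem.List.pyGetD rows i []) c 0))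

def bTail (items : List (String × Int × Int)) (c : Int) (rows : List (List Int)) :
    List (List (List Int) × String × String) :=
  let n : Int := PySem.List.len items
  let steps := (PySem.List.pyRange 1 (n + 1) 1).foldl
    (fun steps i => steps ++ [bStepF items c rows i]) []
  let bt := (PySem.List.pyRange n 0 (-1)).foldl
    (fun (st : List String × Int) i =>
      if PySem.List.pyGetD (PySem.List.pyGetD rows i []) st.2 0 ≠
         PySem.List.pyGetD (PySem.List.pyGetD rows (i - 1) []) st.2 0 then
        let item := (PySem.List.pyGet? items (i - 1)).getD ("", 0, 0)
        (st.1 ++ [item.1], st.2 - item.2.1)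
      else st) ([], c)
  steps ++ [(rows.map (fun row => row), msgOpt bt.1,
             msgTot (PySem.List.pyGetD (PySem.List.pyGetD rows n []) c 0) c)]

def pvLayers (c : Int) (items : List (String × Int × Int)) :
    PySem.Dict Int Int × List (PySem.Dict Int Int) :=
  items.foldl
    (fun st it =>
      let new := stepDict c it.2.1 it.2.2 st.1
      (new, st.2 ++ [new]))
    (PySem.Dict.ofList [(0, 0)], [PySem.Dict.ofList [(0, 0)]])

lemma knapsack_sim_alt_eq (items : List (String × Int × Int)) (c : Int) :
    knapsack_sim_alt items c = bTail items c ((pvLayers c items).2.map (rowFn c)) := rfl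

lemma mapConstRange (a b : Int) (z : List Int) :
    (PySem.List.pyRange a b 1).map (fun _ => z) = List.replicate (b - a).toNat z := by
  rw [List.map_const']
  rw [PySem.List.length_pyRange_one]

lemma outerA (items : List (String × Int × Int)) (c : Int) :
    ∀ (k : Nat), k ≤ items.length →
    (PySem.List.pyRange 1 ((k : Int) + 1) 1).foldl (aBody items c)
        ((PySem.List.pyRange 0 ((items.length : Int) + 1) 1).map (fun _ => zrow c), [])
      = (rowsPre c (items.take k) ++ List.replicate (items.length - k) (zrow c),
         (PySem.List.pyRange 1 ((k : Int) + 1) 1).map (stepOf items c)) := by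
  intro k
  induction k with
  | zero =>
      intro _
      have h0 : PySem.List.pyRange 1 (((0 : Nat) : Int) + 1) 1 = [] :=
        PySem.List.pyRange_one_eq_nil (by omega)
      rw [h0]
      simp only [List.foldl_nil, List.map_nil]
      have hdp0 : (PySem.List.pyRange 0 ((items.length : Int) + 1) 1).map (fun _ => zrow c)
          = List.replicate (items.length + 1) (zrow c) := by
        rw [mapConstRange]
        congr 1
        try omega
      rw [hdp0]
      have h2 : rowsPre c (items.take 0) ++ List.replicate (items.length - 0) (zrow c)
          = List.replicate (items.length + 1) (zrow c) := by
        simp [rowsPre, List.replicate_succ]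
      rw [h2]
  | succ k ih =>
      intro hk1
      have hk2 : k < items.length := hk1
      have hcast : (((k + 1 : Nat) : Int)) + 1 = ((k : Int) + 1) + 1 := by push_cast; ring
      have hsplit : PySem.List.pyRange 1 (((k : Int) + 1) + 1) 1
          = PySem.List.pyRange 1 ((k : Int) + 1) 1 ++ [(k : Int) + 1] :=
        PySem.List.pyRange_one_succ_right (by omega)
      rw [hcast, hsplit, List.foldl_append, List.map_append, ih (by omega)]
      simp only [List.foldl_cons, List.foldl_nil, List.map_cons, List.map_nil]
      have hRlen : (rowsPre c (items.take k)).length = k + 1 := by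
        rw [rowsPre_length]; simp [Nat.min_eq_left (le_of_lt hk2)]
      have hRne : rowsPre c (items.take k) ≠ [] := by
        intro h; rw [h] at hRlen; simp at hRlen
      have hDklen : (rowsPre c (items.take k) ++ List.replicate (items.length - k) (zrow c)).length
          = items.length + 1 := by
        simp [hRlen]; omega
      have hitem : (PySem.List.pyGet? items ((k : Int) + 1 - 1)).getD ("", 0, 0) = items[k] := by
        have h1 : (k : Int) + 1 - 1 = ((k : Nat) : Int) := by ring
        rw [h1, PySem.List.pyGet?_natCast, List.getElem?_eq_getElem hk2]; rfl
      simp only [aBody, hitem]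
      have hgetk : PySem.List.pyGetD
            (rowsPre c (items.take k) ++ List.replicate (items.length - k) (zrow c))
            ((k : Int) + 1 - 1) []
          = PySem.List.pyGetD (rowsPre c (items.take k)) (-1) [] := by
        have h1 : (k : Int) + 1 - 1 = ((k : Nat) : Int) := by ring
        rw [h1, PySem.List.pyGetD_eq_getElem _ _ (by omega) (by omega)]
        simp only [Int.toNat_natCast]
        rw [List.getElem_append_left (by omega), PySem.List.pyGetD_neg_one _ _ hRne,
            List.getLast_eq_getElem]
        congr 1
        omega
      rw [innerFold ((k : Int) + 1) (items[k]).2.1 (items[k]).2.2 (by omega) _ _ _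
            (fun j hj => (PySem.List.mem_pyRange_one.mp hj).1)
            (by omega) hgetk]
      have hidx : ((k : Int) + 1).toNat = k + 1 := by omega
      have hzrowk : PySem.List.pyGetD
            (rowsPre c (items.take k) ++ List.replicate (items.length - k) (zrow c))
            ((k : Int) + 1) [] = zrow c := by
        rw [PySem.List.pyGetD_eq_getElem _ _ (by omega) (by omega)]
        simp only [hidx]
        rw [List.getElem_append_right (by omega)]
        simp
      rw [hzrowk, setFold_full c _ (zrow c) (by simp [zrow]), ← nextRow]
      have htake : items.take (k + 1) = items.take k ++ [items[k]] := by
        rw [List.take_add_one, List.getElem?_eq_getElem hk2]; rfl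
      have hrows : rowsPre c (items.take (k + 1)) = rowsPre c (items.take k) ++
          [nextRow c (items[k]).2.1 (items[k]).2.2
            (PySem.List.pyGetD (rowsPre c (items.take k)) (-1) [])] := by
        rw [htake, rowsPre_snoc]
      have hDk1 : PySem.List.pySetD
            (rowsPre c (items.take k) ++ List.replicate (items.length - k) (zrow c))
            ((k : Int) + 1)
            (nextRow c (items[k]).2.1 (items[k]).2.2
              (PySem.List.pyGetD (rowsPre c (items.take k)) (-1) []))
          = rowsPre c (items.take (k + 1)) ++
            List.replicate (items.length - (k + 1)) (zrow c) := by
        rw [PySem.List.pySetD_of_nonneg _ _ (by omega), hidx,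
            set_append_of_len _ _ _ hRlen]
        have hrep : items.length - k = (items.length - (k + 1)) + 1 := by omega
        rw [hrep, List.replicate_succ, List.set_cons_zero, hrows]
        simp
      rw [hDk1]
      have hlen1 : (rowsPre c (items.take (k + 1))).length = k + 2 := by
        rw [rowsPre_length]; simp [Nat.min_eq_left hk1]
      have hrow1 : PySem.List.pyGetD
            (rowsPre c (items.take (k + 1)) ++ List.replicate (items.length - (k + 1)) (zrow c))
            ((k : Int) + 1) []
          = PySem.List.pyGetD (rowsPre c items) ((k : Int) + 1) [] := by
        have hlenfull : (rowsPre c items).length = items.length + 1 := rowsPre_length c items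
        rw [PySem.List.pyGetD_eq_getElem _ _ (by omega) (by simp [hlen1]; omega),
            PySem.List.pyGetD_eq_getElem _ _ (by omega) (by omega)]
        simp only [hidx]
        rw [List.getElem_append_left (by omega)]
        have ht := rowsPre_take c items (k + 1) hk1
        have h3 : (rowsPre c items)[k + 1]'(by omega)
            = ((rowsPre c items).take (k + 2))[k + 1]'(by rw [List.length_take]; omega) := by
          rw [List.getElem_take]
        rw [h3]
        congr 1
        exact ht.symm
      refine congrArg (Prod.mk _) ?_
      have helem :
          ((rowsPre c (items.take (k + 1)) ++
              List.replicate (items.length - (k + 1)) (zrow c)).map (fun row => row),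
           msgItem (items[k]).1 (items[k]).2.1 (items[k]).2.2,
           msgCur (PySem.List.pyGetD (PySem.List.pyGetD
             (rowsPre c (items.take (k + 1)) ++
               List.replicate (items.length - (k + 1)) (zrow c)) ((k : Int) + 1) []) c 0))
          = stepOf items c ((k : Int) + 1) := by
        simp only [stepOf, hitem]
        rw [hrow1]
        simp [List.map_id', hidx]
      rw [helem]

lemma bStep_eq_stepOf (items : List (String × Int × Int)) (c : Int) (i : Int)
    (h1 : 1 ≤ i) (h2 : i < (items.length : Int) + 1) :
    bStepF items c (rowsPre c items) i = stepOf items c i := by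
  have hm : i.toNat ≤ items.length := by omega
  have htous : (i + 1).toNat = i.toNat + 1 := by omega
  simp only [bStepF, stepOf]
  rw [PySem.List.slice_to _ (by omega), htous, rowsPre_take c items i.toNat hm,
      mapConstRange]
  have hrep : ((PySem.List.len items - i) - 0).toNat = items.length - i.toNat := by
    rw [PySem.List.len_eq]; omega
  rw [hrep]
  simp [List.map_id']

lemma A_eq_bTail (items : List (String × Int × Int)) (c : Int) :
    knapsack_sim items c = bTail items c (rowsPre c items) := by
  rw [knapsack_sim_eq]
  simp only [PySem.List.len_eq]
  rw [outerA items c items.length (le_refl _), List.take_length]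
  simp only [Nat.sub_self, List.replicate_zero, List.append_nil]
  simp only [aTail, bTail, PySem.List.len_eq]
  rw [PySem.List.foldl_append_singleton_eq_map]
  rw [List.map_congr_left (fun i hi =>
    bStep_eq_stepOf items c i (PySem.List.mem_pyRange_one.mp hi).1
      (PySem.List.mem_pyRange_one.mp hi).2)]
  simp only [List.nil_append]

-- ---- B-side: the reachable-states dict realizes the same nextRow chain ----

def omax : Option Int → Option Int → Option Int
  | none, b => b
  | some a, none => some a
  | some a, some b => some (max a b)

lemma omax_none_right (a : Option Int) : omax a none = a := by cases a <;> rfl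

lemma omax_assoc (a b c : Option Int) : omax (omax a b) c = omax a (omax b c) := by
  cases a <;> cases b <;> cases c <;> simp [omax, max_assoc]

lemma omax_comm (a b : Option Int) : omax a b = omax b a := by
  cases a <;> cases b <;> simp [omax, max_comm]

def omaxL (l : List (Option Int)) : Option Int := l.foldl omax none

lemma foldl_omax (l : List (Option Int)) : ∀ a, l.foldl omax a = omax a (omaxL l) := by
  induction l with
  | nil => intro a; simp [omaxL, omax_none_right]
  | cons x t ih =>
      intro a
      show List.foldl omax (omax a x) t = omax a (omaxL (x :: t))
      have h2 : omaxL (x :: t) = omax x (omaxL t) := by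
        show List.foldl omax (omax none x) t = omax x (omaxL t)
        rw [show omax none x = x from rfl, ih]
      rw [ih, h2, omax_assoc]

lemma omaxL_cons (x : Option Int) (t : List (Option Int)) :
    omaxL (x :: t) = omax x (omaxL t) := by
  show List.foldl omax (omax none x) t = omax x (omaxL t)
  rw [show omax none x = x from rfl, foldl_omax]

lemma omaxL_append (l1 l2 : List (Option Int)) :
    omaxL (l1 ++ l2) = omax (omaxL l1) (omaxL l2) := by
  simp only [omaxL, List.foldl_append]
  rw [foldl_omax]
  rfl

lemma omaxL_all_none (l : List (Option Int)) (h : ∀ x ∈ l, x = none) : omaxL l = none := by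
  induction l with
  | nil => rfl
  | cons x t ih =>
      rw [omaxL_cons, h x (by simp), ih (fun y hy => h y (by simp [hy]))]
      rfl

lemma omaxL_split (l : List Int) (f g : Int → Option Int) :
    omaxL (l.map (fun k => omax (f k) (g k)))
      = omax (omaxL (l.map f)) (omaxL (l.map g)) := by
  induction l with
  | nil => rfl
  | cons x t ih =>
      simp only [List.map_cons]
      rw [omaxL_cons, omaxL_cons, omaxL_cons, ih]
      rw [omax_assoc, omax_assoc]
      congr 1
      rw [← omax_assoc, ← omax_assoc, omax_comm (g x)]

lemma omax_map_add (v : Int) (a b : Option Int) :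
    omax (a.map (· + v)) (b.map (· + v)) = (omax a b).map (· + v) := by
  cases a <;> cases b <;> simp [omax]

lemma omaxL_map_add (v : Int) (l : List (Option Int)) :
    omaxL (l.map (Option.map (· + v))) = (omaxL l).map (· + v) := by
  induction l with
  | nil => rfl
  | cons x t ih =>
      simp only [List.map_cons]
      rw [omaxL_cons, omaxL_cons, ih, omax_map_add]

-- best value among achievable weights ≤ j
def bestD (d : PySem.Dict Int Int) (j : Int) : Option Int :=
  omaxL ((PySem.List.pyRange 0 (j + 1) 1).map (fun k => d.get? k))

-- the conditional insert of B's inner loop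
def hstep (cap : Int) (new : PySem.Dict Int Int) (x val : Int) : PySem.Dict Int Int :=
  if x ≤ cap then
    match new.get? x with
    | none => new.insert x val
    | some cur => if cur < val then new.insert x val else new
  else new

lemma get?_hstep (cap : Int) (new : PySem.Dict Int Int) (x val y : Int) :
    (hstep cap new x val).get? y
      = if y = x ∧ x ≤ cap then omax (new.get? y) (some val) else new.get? y := by
  unfold hstep
  by_cases hc : x ≤ cap
  · simp only [hc, if_true, and_true]
    rcases hx : new.get? x with _ | cur
    · simp only
      rw [PySem.Dict.get?_insert]
      by_cases hy : y = x
      · subst hy; simp [hx, omax]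
      · simp [hy]
    · simp only
      by_cases hlt : cur < val
      · simp only [hlt, if_true]
        rw [PySem.Dict.get?_insert]
        by_cases hy : y = x
        · subst hy; simp [hx, omax, max_eq_right (le_of_lt hlt)]
        · simp [hy]
      · simp only [hlt, if_false]
        by_cases hy : y = x
        · subst hy; simp [hx, omax, max_eq_left (not_lt.mp hlt)]
        · simp [hy]
  · simp [hc]

lemma nodup_hstep (cap : Int) (new : PySem.Dict Int Int) (x val : Int)
    (h : new.keys.Nodup) : (hstep cap new x val).keys.Nodup := by
  unfold hstep
  split_ifs
  · rcases hx : new.get? x with _ | cur <;> simp only [hx]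
    · exact PySem.Dict.nodup_keys_insert _ _ _ h
    · split_ifs
      · exact PySem.Dict.nodup_keys_insert _ _ _ h
      · exact h
  · exact h

-- lookup in an association list (definitionally Dict.get? of the packaged list)
def lk (l : List (Int × Int)) (y : Int) : Option Int :=
  (l.find? (fun p => p.1 == y)).map (fun p => p.2)

lemma lk_eq_get? (d : PySem.Dict Int Int) (y : Int) : lk d.items y = d.get? y := rfl

def pairStep (cap w v : Int) (new : PySem.Dict Int Int) (p : Int × Int) : PySem.Dict Int Int :=
  hstep cap (hstep cap new p.1 p.2) (p.1 + w) (p.2 + v)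

lemma stepDict_eq_hstep (cap w v : Int) (d : PySem.Dict Int Int) :
    stepDict cap w v d = d.items.foldl (pairStep cap w v) PySem.Dict.empty := by
  unfold stepDict
  congr 1
  funext new p
  simp [List.foldl_cons, List.foldl_nil, pairStep, hstep, add_zero]

lemma omax_rearr (A B C D E : Option Int) :
    omax (omax A (omax B C)) (omax D E) = omax A (omax (omax B D) (omax C E)) := by
  cases A <;> cases B <;> cases C <;> cases D <;> cases E <;>
    simp [omax, max_assoc, max_comm, max_left_comm]

lemma lk_none_of_not_mem (t : List (Int × Int)) (z : Int) (h : z ∉ t.map Prod.fst) :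
    lk t z = none := by
  unfold lk
  rw [List.find?_eq_none.mpr]
  · rfl
  · intro q hq
    simp only [beq_iff_eq]
    intro hq1
    exact h (by rw [← hq1]; exact List.mem_map_of_mem hq)

lemma fold_get?_gt (cap w v : Int) (l : List (Int × Int)) :
    ∀ (acc : PySem.Dict Int Int) (y : Int), cap < y →
      (l.foldl (pairStep cap w v) acc).get? y = acc.get? y := by
  induction l with
  | nil => intro acc y _; rfl
  | cons p t ih =>
      intro acc y hy
      simp only [List.foldl_cons]
      rw [ih _ y hy]
      unfold pairStep
      rw [get?_hstep, get?_hstep]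
      have h1 : ¬(y = p.1 ∧ p.1 ≤ cap) := by rintro ⟨rfl, h⟩; omega
      have h2 : ¬(y = p.1 + w ∧ p.1 + w ≤ cap) := by rintro ⟨rfl, h⟩; omega
      simp [h1, h2]

lemma fold_get?_le (cap w v : Int) (l : List (Int × Int)) :
    ∀ (acc : PySem.Dict Int Int) (y : Int), y ≤ cap → (l.map Prod.fst).Nodup →
      (l.foldl (pairStep cap w v) acc).get? y
        = omax (acc.get? y) (omax (lk l y) ((lk l (y - w)).map (· + v))) := by
  induction l with
  | nil =>
      intro acc y _ _
      show acc.get? y = omax (acc.get? y) (omax none none)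
      rw [show omax (none : Option Int) none = none from rfl, omax_none_right]
  | cons p t ih =>
      intro acc y hy hnd
      rw [List.map_cons, List.nodup_cons] at hnd
      obtain ⟨hpt, htnd⟩ := hnd
      simp only [List.foldl_cons]
      rw [ih _ y hy htnd]
      have hφ : (pairStep cap w v acc p).get? y
          = omax (acc.get? y) (omax (if y = p.1 then some p.2 else none)
              (if y = p.1 + w then some (p.2 + v) else none)) := by
        unfold pairStep
        rw [get?_hstep, get?_hstep]
        by_cases h1 : y = p.1 <;> by_cases h2 : y = p.1 + w
        · have hc1 : y = p.1 ∧ p.1 ≤ cap := ⟨h1, h1 ▸ hy⟩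
          have hc2 : y = p.1 + w ∧ p.1 + w ≤ cap := ⟨h2, h2 ▸ hy⟩
          rw [if_pos hc2, if_pos hc1, if_pos h1, if_pos h2, omax_assoc]
        · have hc1 : y = p.1 ∧ p.1 ≤ cap := ⟨h1, h1 ▸ hy⟩
          have hn2 : ¬(y = p.1 + w ∧ p.1 + w ≤ cap) := fun h => h2 h.1
          rw [if_neg hn2, if_pos hc1, if_pos h1, if_neg h2, omax_none_right]
        · have hc2 : y = p.1 + w ∧ p.1 + w ≤ cap := ⟨h2, h2 ▸ hy⟩
          have hn1 : ¬(y = p.1 ∧ p.1 ≤ cap) := fun h => h1 h.1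
          rw [if_pos hc2, if_neg hn1, if_neg h1, if_pos h2]
          rfl
        · have hn1 : ¬(y = p.1 ∧ p.1 ≤ cap) := fun h => h1 h.1
          have hn2 : ¬(y = p.1 + w ∧ p.1 + w ≤ cap) := fun h => h2 h.1
          rw [if_neg hn2, if_neg hn1, if_neg h1, if_neg h2,
              show omax (none : Option Int) none = none from rfl, omax_none_right]
      have hlk1 : lk (p :: t) y = omax (if y = p.1 then some p.2 else none) (lk t y) := by
        by_cases h : y = p.1
        · have ht : lk t y = none := lk_none_of_not_mem t y (h ▸ hpt)
          unfold lk at ht ⊢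
          rw [List.find?_cons_of_pos (by simp [h]), if_pos h, ht]
          rfl
        · unfold lk
          rw [List.find?_cons_of_neg (by simp [beq_iff_eq]; omega), if_neg h]
          rfl
      have hlk2 : lk (p :: t) (y - w)
          = omax (if y = p.1 + w then some p.2 else none) (lk t (y - w)) := by
        by_cases h : y = p.1 + w
        · have h' : p.1 = y - w := by omega
          have ht : lk t (y - w) = none := lk_none_of_not_mem t (y - w) (h' ▸ hpt)
          unfold lk at ht ⊢
          rw [List.find?_cons_of_pos (by simp [h']), if_pos h, ht]
          rfl
        · unfold lk
          rw [List.find?_cons_of_neg (by simp [beq_iff_eq]; omega), if_neg h]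
          rfl
      rw [hφ, hlk1, hlk2]
      have hmap : ((omax (if y = p.1 + w then some p.2 else none) (lk t (y - w))).map (· + v))
          = omax (if y = p.1 + w then some (p.2 + v) else none) ((lk t (y - w)).map (· + v)) := by
        rw [← omax_map_add]
        congr 1
        by_cases h : y = p.1 + w <;> simp [h]
      rw [hmap, omax_rearr]

lemma stepDict_get? (cap w v : Int) (d : PySem.Dict Int Int) (hnd : d.keys.Nodup) (y : Int) :
    (stepDict cap w v d).get? y
      = if y ≤ cap then omax (d.get? y) ((d.get? (y - w)).map (· + v)) else none := by
  rw [stepDict_eq_hstep]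
  by_cases hy : y ≤ cap
  · rw [if_pos hy,
        fold_get?_le cap w v d.items PySem.Dict.empty y hy (by exact hnd),
        lk_eq_get?, lk_eq_get?, PySem.Dict.get?_empty]
    rfl
  · rw [if_neg hy, fold_get?_gt cap w v d.items PySem.Dict.empty y (by omega)]
    exact PySem.Dict.get?_empty y

-- invariants carried along the layers
def GoodD (cap : Int) (d : PySem.Dict Int Int) : Prop :=
  d.keys.Nodup ∧ d.get? 0 ≠ none ∧ ∀ y, d.get? y ≠ none → 0 ≤ y ∧ y ≤ cap

lemma nodup_fold_pairStep (cap w v : Int) (l : List (Int × Int)) :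
    ∀ acc : PySem.Dict Int Int, acc.keys.Nodup → (l.foldl (pairStep cap w v) acc).keys.Nodup := by
  induction l with
  | nil => intro acc h; exact h
  | cons p t ih =>
      intro acc h
      exact ih _ (nodup_hstep _ _ _ _ (nodup_hstep _ _ _ _ h))

lemma omax_ne_none (a b : Option Int) (h : omax a b ≠ none) : a ≠ none ∨ b ≠ none := by
  cases a <;> cases b <;> simp_all [omax]

lemma GoodD_step (cap w v : Int) (d : PySem.Dict Int Int)
    (hcap : 0 ≤ cap) (hw : 0 ≤ w) (hd : GoodD cap d) : GoodD cap (stepDict cap w v d) := by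
  obtain ⟨hnd, h0, hr⟩ := hd
  refine ⟨?_, ?_, ?_⟩
  · rw [stepDict_eq_hstep]
    exact nodup_fold_pairStep _ _ _ _ _ PySem.Dict.nodup_keys_empty
  · rw [stepDict_get? _ _ _ _ hnd, if_pos hcap]
    rcases hx : d.get? 0 with _ | a
    · exact absurd hx h0
    · cases (d.get? (0 - w)).map (· + v) <;> simp [omax]
  · intro y hy
    rw [stepDict_get? _ _ _ _ hnd] at hy
    by_cases hyc : y ≤ cap
    · rw [if_pos hyc] at hy
      refine ⟨?_, hyc⟩
      rcases omax_ne_none _ _ hy with h | h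
      · exact (hr y h).1
      · have : d.get? (y - w) ≠ none := by
          intro hz; rw [hz] at h; exact h rfl
        have := (hr _ this).1
        omega
    · rw [if_neg hyc] at hy; exact absurd rfl hy

-- best value among achievable weights ≤ j is never none (weight 0 is achievable)
lemma omaxL_ne_none_of_mem (l : List (Option Int)) (x : Option Int)
    (hx : x ∈ l) (h : x ≠ none) : omaxL l ≠ none := by
  induction l with
  | nil => simp at hx
  | cons a t ih =>
      rw [omaxL_cons]
      rcases List.mem_cons.mp hx with rfl | hm
      · cases x
        · exact absurd rfl h
        · cases omaxL t <;> simp [omax]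
      · have := ih hm
        cases a <;> cases hz : omaxL t <;> simp_all [omax]

lemma bestD_ne_none (d : PySem.Dict Int Int) (j : Int)
    (h0 : d.get? 0 ≠ none) (hj : 0 ≤ j) : bestD d j ≠ none := by
  unfold bestD
  refine omaxL_ne_none_of_mem _ (d.get? 0) ?_ h0
  exact List.mem_map_of_mem (PySem.List.mem_pyRange_one.mpr ⟨le_refl 0, by omega⟩)

lemma pyRange_map_shift {α : Type} (f : Int → α) (w : Int) :
    ∀ (n : Nat) (a : Int), (PySem.List.pyRange a (a + n) 1).map (fun k => f (k - w))
      = (PySem.List.pyRange (a - w) (a - w + n) 1).map f := by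
  intro n
  induction n with
  | zero =>
      intro a
      rw [PySem.List.pyRange_one_eq_nil (by omega), PySem.List.pyRange_one_eq_nil (by omega)]
      rfl
  | succ n ih =>
      intro a
      have h1 : a + ((n + 1 : Nat) : Int) = (a + n) + 1 := by push_cast; ring
      have h2 : a - w + ((n + 1 : Nat) : Int) = (a - w + n) + 1 := by push_cast; ring
      rw [h1, h2, PySem.List.pyRange_one_succ_right (by omega),
          PySem.List.pyRange_one_succ_right (by omega), List.map_append, List.map_append, ih]
      simp only [List.map_cons, List.map_nil]
      rw [show a + (n : Int) - w = a - w + n from by ring]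

lemma bestD_step (cap w v : Int) (d : PySem.Dict Int Int) (j : Int)
    (hd : GoodD cap d) (hw : 0 ≤ w) (hj : 0 ≤ j) (hjc : j ≤ cap) :
    bestD (stepDict cap w v d) j
      = if w ≤ j then omax (bestD d j) ((bestD d (j - w)).map (· + v)) else bestD d j := by
  unfold bestD
  rw [List.map_congr_left (fun k hk => by
    obtain ⟨hk0, hk1⟩ := PySem.List.mem_pyRange_one.mp hk
    rw [stepDict_get? cap w v d hd.1 k, if_pos (by omega)])]
  rw [omaxL_split]
  have hmm : (PySem.List.pyRange 0 (j + 1) 1).map (fun k => (d.get? (k - w)).map (· + v))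
      = ((PySem.List.pyRange 0 (j + 1) 1).map (fun k => d.get? (k - w))).map
          (Option.map (· + v)) := by
    rw [List.map_map]; rfl
  rw [hmm, omaxL_map_add]
  have hnone : ∀ z : Int, z < 0 → d.get? z = none := by
    intro z hz
    by_contra h
    have := (hd.2.2 z h).1
    omega
  by_cases hwj : w ≤ j
  · rw [if_pos hwj]
    congr 2
    have hsplit : PySem.List.pyRange 0 (j + 1) 1
        = PySem.List.pyRange 0 w 1 ++ PySem.List.pyRange w (j + 1) 1 :=
      PySem.List.pyRange_one_append 0 w (j + 1) hw (by omega)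
    rw [hsplit, List.map_append, omaxL_append]
    have hfst : omaxL ((PySem.List.pyRange 0 w 1).map (fun k => d.get? (k - w))) = none := by
      apply omaxL_all_none
      intro x hx
      obtain ⟨k, hk, rfl⟩ := List.mem_map.mp hx
      obtain ⟨hk0, hk1⟩ := PySem.List.mem_pyRange_one.mp hk
      exact hnone _ (by omega)
    rw [hfst, show ∀ z, omax none z = z from fun z => rfl]
    have h1 : j + 1 = w + ((j + 1 - w).toNat : Int) := by omega
    have h2 : (j - w) + 1 = 0 + ((j + 1 - w).toNat : Int) := by omega
    rw [h1, pyRange_map_shift, show w - w = (0 : Int) from by ring, ← h2]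
  · rw [if_neg hwj]
    have hsnd : omaxL ((PySem.List.pyRange 0 (j + 1) 1).map (fun k => d.get? (k - w))) = none := by
      apply omaxL_all_none
      intro x hx
      obtain ⟨k, hk, rfl⟩ := List.mem_map.mp hx
      obtain ⟨hk0, hk1⟩ := PySem.List.mem_pyRange_one.mp hk
      exact hnone _ (by omega)
    rw [hsnd]
    exact omax_none_right _

-- small pyGetD helpers for the scatter array
lemma pyGetD_replicate_none {α : Type} (n : Nat) (k : Int) :
    PySem.List.pyGetD (List.replicate n (none : Option α)) k none = none := by
  unfold PySem.List.pyGetD PySem.List.pyGet?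
  rcases hx : PySem.List.pyIdx? (List.replicate n (none : Option α)).length k with _ | m
  · rfl
  · rcases hy : (List.replicate n (none : Option α))[m]? with _ | z
    · simp [hy]
    · have := List.mem_of_getElem? hy
      rw [List.eq_of_mem_replicate this] at hy
      simp [hy]

lemma length_pySetD {α : Type} (xs : List α) (i : Int) (v : α) (hi : 0 ≤ i) :
    (PySem.List.pySetD xs i v).length = xs.length := by
  rw [PySem.List.pySetD_of_nonneg _ _ hi, List.length_set]

lemma pyGetD_out_of_range {α : Type} (xs : List α) (k : Int) (d : α)
    (hk : 0 ≤ k) (h : (xs.length : Int) ≤ k) : PySem.List.pyGetD xs k d = d := by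
  unfold PySem.List.pyGetD PySem.List.pyGet? PySem.List.pyIdx?
  rw [if_pos hk, if_neg (by omega)]
  rfl

lemma pyGetD_pySetD_ne {α : Type} (xs : List α) (i k : Int) (v d : α)
    (hi : 0 ≤ i) (hil : i < (xs.length : Int)) (hk : 0 ≤ k) (hne : k ≠ i) :
    PySem.List.pyGetD (PySem.List.pySetD xs i v) k d = PySem.List.pyGetD xs k d := by
  by_cases h : k < (xs.length : Int)
  · rw [PySem.List.pySetD_of_nonneg _ _ hi,
        PySem.List.pyGetD_eq_getElem _ _ hk (by rw [List.length_set]; exact h),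
        PySem.List.pyGetD_eq_getElem _ _ hk h, List.getElem_set]
    rw [if_neg (show ¬ i.toNat = k.toNat by omega)]
  · rw [pyGetD_out_of_range _ _ _ hk (by rw [length_pySetD _ _ _ hi]; omega),
        pyGetD_out_of_range _ _ _ hk (by omega)]

lemma pyGetD_pySetD_self {α : Type} (xs : List α) (i : Int) (v d : α)
    (hi : 0 ≤ i) (hil : i < (xs.length : Int)) :
    PySem.List.pyGetD (PySem.List.pySetD xs i v) i d = v := by
  rw [PySem.List.pySetD_of_nonneg _ _ hi,
      PySem.List.pyGetD_eq_getElem _ _ hi (by rw [List.length_set]; exact hil)]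
  exact List.getElem_set_self _

-- the scatter loop writes each dict entry to its weight slot (keys are distinct and in range)
lemma arrFold (cap : Int) (l : List (Int × Int)) :
    ∀ (arr : List (Option Int)), (l.map Prod.fst).Nodup →
      (∀ p ∈ l, 0 ≤ p.1 ∧ p.1 ≤ cap) →
      (∀ p ∈ l, PySem.List.pyGetD arr p.1 none = none) →
      arr.length = (cap + 1).toNat →
      (∀ k, 0 ≤ k → PySem.List.pyGetD (l.foldl (fun (arr : List (Option Int)) (p : Int × Int) =>
          if 0 ≤ p.1 ∧ p.1 ≤ cap then
            match PySem.List.pyGetD arr p.1 none with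
            | none => PySem.List.pySetD arr p.1 (some p.2)
            | some cur => if cur < p.2 then PySem.List.pySetD arr p.1 (some p.2) else arr
          else arr) arr) k none = (lk l k).or (PySem.List.pyGetD arr k none)) := by
  induction l with
  | nil =>
      intro arr _ _ _ _ k _
      simp [lk]
  | cons p t ih =>
      intro arr hnd hran hfresh hlen k hk0
      rw [List.map_cons, List.nodup_cons] at hnd
      obtain ⟨hpt, htnd⟩ := hnd
      have hp := hran p (by simp)
      have hplen : p.1 < (arr.length : Int) := by omega
      simp only [List.foldl_cons, if_pos hp, hfresh p (by simp)]
      have harr' : ∀ q ∈ t, PySem.List.pyGetD (PySem.List.pySetD arr p.1 (some p.2)) q.1 none = none := by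
        intro q hq
        have hqr := hran q (by simp [hq])
        have hne : q.1 ≠ p.1 := by
          intro h
          exact hpt (h ▸ List.mem_map_of_mem hq)
        rw [pyGetD_pySetD_ne _ _ _ _ _ hp.1 hplen hqr.1 hne]
        exact hfresh q (by simp [hq])
      rw [ih _ htnd (fun q hq => hran q (by simp [hq])) harr'
            (by rw [length_pySetD _ _ _ hp.1]; exact hlen) k hk0]
      by_cases hk : k = p.1
      · have ht : lk t k = none := lk_none_of_not_mem t k (hk ▸ hpt)
        have hcons : lk (p :: t) k = some p.2 := by
          unfold lk
          rw [List.find?_cons_of_pos (by simp [hk])]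
          rfl
        rw [ht, hcons, hk, pyGetD_pySetD_self _ _ _ _ hp.1 hplen]
        simp
      · have hcons : lk (p :: t) k = lk t k := by
          unfold lk
          rw [List.find?_cons_of_neg (by simp [beq_iff_eq]; omega)]
        rw [hcons, pyGetD_pySetD_ne _ _ _ _ _ hp.1 hplen hk0 hk]

-- prefix-maximum characterization of B's second row loop
def pb (arr : List (Option Int)) (j : Int) : Option Int :=
  omaxL ((PySem.List.pyRange 0 (j + 1) 1).map (fun k => PySem.List.pyGetD arr k none))

lemma match_omax (a b : Option Int) :
    (match a, b with
      | some x, none => some x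
      | some x, some y => if x > y then some x else some y
      | none, b => b) = omax b a := by
  cases a <;> cases b <;> simp [omax]
  split_ifs <;> exact congrArg some (by omega)

lemma prefFold (arr : List (Option Int)) :
    ∀ (m : Nat),
      (PySem.List.pyRange 0 (m : Int) 1).foldl
        (fun (st : List Int × Option Int) j =>
          let best : Option Int :=
            match PySem.List.pyGetD arr j none, st.2 with
            | some a, none => some a
            | some a, some b => if a > b then some a else some b
            | none, b => b
          (st.1 ++ [best.getD 0], best)) ([], none)
      = ((PySem.List.pyRange 0 (m : Int) 1).map (fun j => (pb arr j).getD 0),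
         omaxL ((PySem.List.pyRange 0 (m : Int) 1).map (fun k => PySem.List.pyGetD arr k none))) := by
  intro m
  induction m with
  | zero =>
      rw [PySem.List.pyRange_one_eq_nil (by omega)]
      rfl
  | succ m ih =>
      have hc : ((m + 1 : Nat) : Int) = (m : Int) + 1 := by push_cast; ring
      rw [hc, PySem.List.pyRange_one_succ_right (by positivity), List.foldl_append,
          List.map_append, List.map_append, ih]
      simp only [List.foldl_cons, List.foldl_nil, List.map_cons, List.map_nil]
      rw [match_omax]
      have hS : omax (omaxL ((PySem.List.pyRange 0 (m : Int) 1).map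
            (fun k => PySem.List.pyGetD arr k none))) (PySem.List.pyGetD arr (m : Int) none)
          = omaxL (((PySem.List.pyRange 0 (m : Int) 1).map
              (fun k => PySem.List.pyGetD arr k none)) ++ [PySem.List.pyGetD arr (m : Int) none]) := by
        rw [omaxL_append]
        rfl
      rw [hS]
      have hpb : pb arr (m : Int) = omaxL (((PySem.List.pyRange 0 (m : Int) 1).map
          (fun k => PySem.List.pyGetD arr k none)) ++ [PySem.List.pyGetD arr (m : Int) none]) := by
        unfold pb
        rw [PySem.List.pyRange_one_succ_right (by positivity), List.map_append]
        rfl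
      rw [← hpb]

lemma prefFoldInt (arr : List (Option Int)) (c : Int) :
    (PySem.List.pyRange 0 c 1).foldl
        (fun (st : List Int × Option Int) j =>
          let best : Option Int :=
            match PySem.List.pyGetD arr j none, st.2 with
            | some a, none => some a
            | some a, some b => if a > b then some a else some b
            | none, b => b
          (st.1 ++ [best.getD 0], best)) ([], none)
      = ((PySem.List.pyRange 0 c 1).map (fun j => (pb arr j).getD 0),
         omaxL ((PySem.List.pyRange 0 c 1).map (fun k => PySem.List.pyGetD arr k none))) := by
  by_cases hc : 0 ≤ c
  · rw [show c = ((c.toNat : Nat) : Int) from by omega]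
    exact prefFold arr c.toNat
  · rw [PySem.List.pyRange_one_eq_nil (by omega)]
    rfl

-- the scattered array reads back exactly as the dict lookup
lemma rowScatter_get (cap : Int) (d : PySem.Dict Int Int)
    (hnd : d.keys.Nodup) (hr : ∀ y, d.get? y ≠ none → 0 ≤ y ∧ y ≤ cap) :
    ∀ k, 0 ≤ k → PySem.List.pyGetD (rowScatter cap d) k none = d.get? k := by
  intro k hk
  have hran : ∀ p ∈ d.items, 0 ≤ p.1 ∧ p.1 ≤ cap := by
    intro p hp
    refine hr p.1 ?_
    rw [PySem.Dict.get?_of_mem_items d (by exact hp) hnd]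
    exact Option.some_ne_none _
  have := arrFold cap d.items (List.replicate (cap + 1).toNat none) (by exact hnd) hran
    (fun p _ => pyGetD_replicate_none _ _) (by simp) k hk
  rw [show rowScatter cap d = d.items.foldl (fun (arr : List (Option Int)) (p : Int × Int) =>
      if 0 ≤ p.1 ∧ p.1 ≤ cap then
        match PySem.List.pyGetD arr p.1 none with
        | none => PySem.List.pySetD arr p.1 (some p.2)
        | some cur => if cur < p.2 then PySem.List.pySetD arr p.1 (some p.2) else arr
      else arr) (List.replicate (cap + 1).toNat (none : Option Int)) from rfl, this,
    pyGetD_replicate_none, lk_eq_get?]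
  exact Option.or_none

lemma rowFn_eq (cap : Int) (d : PySem.Dict Int Int) (hcap : 0 ≤ cap)
    (hnd : d.keys.Nodup) (hr : ∀ y, d.get? y ≠ none → 0 ≤ y ∧ y ≤ cap) :
    rowFn cap d = (PySem.List.pyRange 0 (cap + 1) 1).map (fun j => (bestD d j).getD 0) := by
  have h2 : rowFn cap d = (PySem.List.pyRange 0 (cap + 1) 1).map
      (fun j => (pb (rowScatter cap d) j).getD 0) :=
    congrArg Prod.fst (prefFoldInt (rowScatter cap d) (cap + 1))
  rw [h2]
  apply List.map_congr_left
  intro j hj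
  obtain ⟨hj0, hj1⟩ := PySem.List.mem_pyRange_one.mp hj
  congr 1
  unfold pb bestD
  apply congrArg
  apply List.map_congr_left
  intro k hk
  obtain ⟨hk0, _⟩ := PySem.List.mem_pyRange_one.mp hk
  exact rowScatter_get cap d hnd hr k hk0

-- the initial layer {0: 0}
lemma get?_d0 (y : Int) :
    (PySem.Dict.ofList [((0 : Int), (0 : Int))]).get? y = if y = 0 then some 0 else none := by
  rw [← lk_eq_get?,
      show (PySem.Dict.ofList [((0 : Int), (0 : Int))]).items = [((0 : Int), (0 : Int))] from rfl]
  unfold lk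
  by_cases h : y = 0
  · rw [List.find?_cons_of_pos (by simp [h]), if_pos h]
    rfl
  · rw [List.find?_cons_of_neg (by simp [beq_iff_eq]; omega), if_neg h]
    rfl

lemma GoodD_d0 (cap : Int) (hcap : 0 ≤ cap) :
    GoodD cap (PySem.Dict.ofList [((0 : Int), (0 : Int))]) := by
  refine ⟨?_, ?_, ?_⟩
  · rw [show (PySem.Dict.ofList [((0 : Int), (0 : Int))]).keys = [0] from rfl]
    simp
  · rw [get?_d0]
    simp
  · intro y hy
    rw [get?_d0] at hy
    by_cases h : y = 0
    · exact ⟨by omega, by omega⟩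
    · rw [if_neg h] at hy; exact absurd rfl hy

lemma bestD_d0 (cap j : Int) (hj : 0 ≤ j) :
    bestD (PySem.Dict.ofList [((0 : Int), (0 : Int))]) j = some 0 := by
  unfold bestD
  have hsplit : PySem.List.pyRange 0 (j + 1) 1
      = PySem.List.pyRange 0 1 1 ++ PySem.List.pyRange 1 (j + 1) 1 :=
    PySem.List.pyRange_one_append 0 1 (j + 1) (by omega) (by omega)
  have h01 : PySem.List.pyRange (0 : Int) 1 1 = [0] := by decide
  rw [hsplit, List.map_append, omaxL_append, h01]
  have hrest : omaxL ((PySem.List.pyRange 1 (j + 1) 1).map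
      (fun k => (PySem.Dict.ofList [((0 : Int), (0 : Int))]).get? k)) = none := by
    apply omaxL_all_none
    intro x hx
    obtain ⟨k, hk, rfl⟩ := List.mem_map.mp hx
    obtain ⟨hk1, _⟩ := PySem.List.mem_pyRange_one.mp hk
    rw [get?_d0, if_neg (by omega)]
  rw [hrest, omax_none_right]
  rw [show ([(0 : Int)].map (fun k => (PySem.Dict.ofList [((0 : Int), (0 : Int))]).get? k))
      = [(PySem.Dict.ofList [((0 : Int), (0 : Int))]).get? 0] from rfl, get?_d0]
  rfl

lemma rowFn_d0 (cap : Int) (hcap : 0 ≤ cap) :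
    rowFn cap (PySem.Dict.ofList [((0 : Int), (0 : Int))]) = zrow cap := by
  rw [rowFn_eq cap _ hcap (GoodD_d0 cap hcap).1 (GoodD_d0 cap hcap).2.2]
  rw [List.map_congr_left (fun j hj => by
    rw [bestD_d0 cap j (PySem.List.mem_pyRange_one.mp hj).1]
    rfl : ∀ j ∈ PySem.List.pyRange 0 (cap + 1) 1, _ = (fun _ => (0 : Int)) j)]
  rw [List.map_const', PySem.List.length_pyRange_one]
  unfold zrow
  congr 1
  omega

lemma pyGetD_rowmap (f : Int → Int) (cap j : Int) (hcap : 0 ≤ cap) (h0 : 0 ≤ j) (h1 : j ≤ cap) :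
    PySem.List.pyGetD ((PySem.List.pyRange 0 (cap + 1) 1).map f) j 0 = f j := by
  have hc : cap + 1 = (((cap + 1).toNat : Nat) : Int) := by omega
  have hj : j = ((j.toNat : Nat) : Int) := by omega
  rw [hc, hj, PySem.List.pyGetD_map_pyRange f _ _ _ (by omega), ← hj]

lemma rowFn_step (cap w v : Int) (d : PySem.Dict Int Int)
    (hcap : 0 ≤ cap) (hw : 0 ≤ w) (hd : GoodD cap d) :
    rowFn cap (stepDict cap w v d) = nextRow cap w v (rowFn cap d) := by
  have hG' := GoodD_step cap w v d hcap hw hd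
  rw [rowFn_eq cap _ hcap hG'.1 hG'.2.2, rowFn_eq cap d hcap hd.1 hd.2.2, nextRow]
  apply List.map_congr_left
  intro j hj
  obtain ⟨hj0, hj1⟩ := PySem.List.mem_pyRange_one.mp hj
  rw [bestD_step cap w v d j hd hw hj0 (by omega)]
  by_cases hwj : w ≤ j
  · rw [if_pos hwj, if_pos hwj,
        pyGetD_rowmap _ cap j hcap hj0 (by omega),
        pyGetD_rowmap _ cap (j - w) hcap (by omega) (by omega)]
    rcases ha : bestD d j with _ | a
    · exact absurd ha (bestD_ne_none d j hd.2.1 hj0)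
    · rcases hb : bestD d (j - w) with _ | b
      · exact absurd hb (bestD_ne_none d (j - w) hd.2.1 (by omega))
      · rfl
  · rw [if_neg hwj, if_neg hwj, pyGetD_rowmap _ cap j hcap hj0 (by omega)]

-- the layers list realizes the nextRow chain
lemma layers_spec (cap : Int) (hcap : 0 ≤ cap) (l : List (String × Int × Int))
    (hw : ∀ it ∈ l, 0 ≤ it.2.1) :
    GoodD cap (pvLayers cap l).1 ∧
    rowFn cap (pvLayers cap l).1 = PySem.List.pyGetD (rowsPre cap l) (-1) [] ∧
    (pvLayers cap l).2.map (rowFn cap) = rowsPre cap l := by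
  induction l using List.reverseRecOn with
  | nil =>
      refine ⟨GoodD_d0 cap hcap, ?_, ?_⟩
      · show rowFn cap (PySem.Dict.ofList [((0 : Int), (0 : Int))])
            = PySem.List.pyGetD (rowsPre cap []) (-1) []
        rw [rowFn_d0 cap hcap, show rowsPre cap [] = [zrow cap] from rfl,
            PySem.List.pyGetD_neg_one _ _ (by simp)]
        simp
      · show [rowFn cap (PySem.Dict.ofList [((0 : Int), (0 : Int))])] = [zrow cap]
        rw [rowFn_d0 cap hcap]
  | append_singleton l x ih =>
      have hw' : ∀ it ∈ l, 0 ≤ it.2.1 := fun it h => hw it (by simp [h])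
      have hx : 0 ≤ x.2.1 := hw x (by simp)
      obtain ⟨hG, hlast, hmap⟩ := ih hw'
      have hfold : pvLayers cap (l ++ [x])
          = (stepDict cap x.2.1 x.2.2 (pvLayers cap l).1,
             (pvLayers cap l).2 ++ [stepDict cap x.2.1 x.2.2 (pvLayers cap l).1]) := by
        unfold pvLayers
        rw [List.foldl_append]
        rfl
      have hR : rowFn cap (stepDict cap x.2.1 x.2.2 (pvLayers cap l).1)
          = nextRow cap x.2.1 x.2.2 (PySem.List.pyGetD (rowsPre cap l) (-1) []) := by
        rw [rowFn_step cap x.2.1 x.2.2 _ hcap hx hG, hlast]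
      refine ⟨?_, ?_, ?_⟩
      · rw [hfold]
        exact GoodD_step cap x.2.1 x.2.2 _ hcap hx hG
      · rw [hfold, rowsPre_snoc]
        simp only
        have hne : rowsPre cap l
            ++ [nextRow cap x.2.1 x.2.2 (PySem.List.pyGetD (rowsPre cap l) (-1) [])] ≠ [] := by
          simp
        rw [hR, PySem.List.pyGetD_neg_one _ _ hne]
        exact List.getLast_concat.symm
      · rw [hfold, rowsPre_snoc]
        simp only [List.map_append, List.map_cons, List.map_nil]
        rw [hmap, hR]

-- ===== VERDICT (by name: the statements are the Claim_ definitions above) =====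

theorem knapsack_sim_spec : Claim_equal_knapsack_sim := by
  intro items capacity _ hpre
  obtain ⟨hcap, hw⟩ := hpre
  show knapsack_sim items capacity = knapsack_sim_alt items capacity
  rw [A_eq_bTail, knapsack_sim_alt_eq, (layers_spec capacity hcap items hw).2.2]
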